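-- pv_equiv track=rewrite | github.com/ahir-chatterjee/riot-scripts | soloQueue.py | assistString
-- ===== SOURCE A (Python) =====
-- def assistString(assistList, identities):
--     if(len(assistList) == 0):
--         return " solo"
--     elif(len(assistList) == 1):
--         return " with " + (identities[assistList[0]])
--     elif(len(assistList) == 2):
--         return " with " + (identities[assistList[0]]) + " and " + (identities[assistList[1]])
--     else:
--         returnStr = " with " + (identities[assistList[0]])
--         for num in range(1,len(assistList)):
--             if(num == len(assistList)-1):
--                 returnStr = returnStr + ", and " + identities[assistList[num]]
--             else:
--                 returnStr = returnStr + ", " + identities[assistList[num]]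
--         return returnStr
-- ===== SOURCE B (Python) =====
-- def assistString(assistList, identities):
--     def tail(ids, two):
--         if len(ids) == 1:
--             return identities[ids[0]]
--         if len(ids) == 2:
--             return identities[ids[0]] + (" and " if two else ", and ") + identities[ids[1]]
--         return identities[ids[0]] + ", " + tail(ids[1:], two)
--     if not assistList:
--         return " solo"
--     return " with " + tail(assistList, len(assistList) == 2)
-- ===== Notes on version B (the rewrite author's own statement) =====
-- stated objective: alternative
-- what changed: Replaces A's 0/1/2/else branch ladder and index-counting accumulation loop with a structural recursion over the list that peels one name at a time and decides the final separator at the two-remaining base case instead of testing loop indices.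
import Mathlib
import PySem

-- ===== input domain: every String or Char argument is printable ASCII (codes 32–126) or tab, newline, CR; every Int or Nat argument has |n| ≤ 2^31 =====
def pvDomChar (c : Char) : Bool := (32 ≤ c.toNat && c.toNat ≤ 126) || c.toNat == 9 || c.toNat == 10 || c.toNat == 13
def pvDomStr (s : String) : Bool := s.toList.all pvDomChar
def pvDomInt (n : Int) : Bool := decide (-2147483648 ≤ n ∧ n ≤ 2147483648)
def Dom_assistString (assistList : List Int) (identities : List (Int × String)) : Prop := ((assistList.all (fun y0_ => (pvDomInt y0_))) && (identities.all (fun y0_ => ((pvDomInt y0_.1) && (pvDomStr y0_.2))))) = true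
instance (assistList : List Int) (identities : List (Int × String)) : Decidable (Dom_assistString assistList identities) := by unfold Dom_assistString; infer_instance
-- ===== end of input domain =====

-- B replaces A's 0/1/2/else branch ladder and index-testing loop by a structural
-- recursion that peels one name at a time, choosing the final separator at the
-- two-remaining base case (objective: alternative; return value only).

-- shared primitive: Python dict lookup identities[a] (first match in the association
-- list; the KeyError case — no match — is excluded by Pre_, here it yields "")
def pyLookup (identities : List (Int × String)) (a : Int) : String :=
  match identities.find? (fun p => p.1 == a) with
  | some p => p.2
  | none => ""

-- ===== PORT A =====
def assistString (assistList : List Int) (identities : List (Int × String)) : String :=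
  if assistList.length = 0 then " solo"
  else if assistList.length = 1 then
    " with " ++ pyLookup identities (PySem.List.pyGetD assistList 0 0)
  else if assistList.length = 2 then
    " with " ++ pyLookup identities (PySem.List.pyGetD assistList 0 0)
      ++ " and " ++ pyLookup identities (PySem.List.pyGetD assistList 1 0)
  else
    (PySem.List.pyRange 1 (assistList.length : Int) 1).foldl
      (fun returnStr num =>
        if num = (assistList.length : Int) - 1 then
          returnStr ++ ", and " ++ pyLookup identities (PySem.List.pyGetD assistList num 0)
        else
          returnStr ++ ", " ++ pyLookup identities (PySem.List.pyGetD assistList num 0))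
      (" with " ++ pyLookup identities (PySem.List.pyGetD assistList 0 0))

-- ===== PORT B =====
-- Source B's inner recursive helper tail(ids, two)
def tailB (identities : List (Int × String)) : List Int → Bool → String
  | [], _ => ""          -- unreachable: tail is only called on nonempty lists
  | [x], _ => pyLookup identities x
  | [x, y], two =>
      pyLookup identities x ++ (if two then " and " else ", and ") ++ pyLookup identities y
  | x :: y :: z :: rest, two =>
      pyLookup identities x ++ ", " ++ tailB identities (y :: z :: rest) two

def assistString_alt (assistList : List Int) (identities : List (Int × String)) : String :=
  if assistList = [] then " solo"
  else " with " ++ tailB identities assistList (assistList.length == 2)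

-- ===== PRECONDITION & SPEC =====
-- Pre_ excludes exactly the inputs where Python A raises KeyError: some assist id
-- has no entry in identities.
def Pre_assistString (assistList : List Int) (identities : List (Int × String)) : Prop :=
  (assistList.all (fun a => identities.any (fun p => p.1 == a))) = true
instance (assistList : List Int) (identities : List (Int × String)) : Decidable (Pre_assistString assistList identities) := by unfold Pre_assistString; infer_instance

def pvWitness_assistString : List Int × (List (Int × String)) :=
  ([1, 2, 3], [(1, "alice"), (2, "bob"), (3, "carol")])

def Spec_assistString (assistList : List Int) (identities : List (Int × String)) (out : String) : Prop := out = assistString_alt assistList identities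
instance (assistList : List Int) (identities : List (Int × String)) (out : String) : Decidable (Spec_assistString assistList identities out) := by unfold Spec_assistString; infer_instance

-- ===== CLAIM (what is proved, stated in full; the proofs are below) =====
def Claim_equal_assistString : Prop := ∀ (assistList : List Int) (identities : List (Int × String)), Dom_assistString assistList identities → Pre_assistString assistList identities → Spec_assistString assistList identities (assistString assistList identities)

-- ===== LEMMAS AND PROOFS =====

-- what A's loop produces from initial string s over the remaining names
def tailJoin : List String → String → String
  | [], s => s
  | [y], s => s ++ ", and " ++ y
  | y :: z :: zs, s => tailJoin (z :: zs) (s ++ ", " ++ y)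

-- the suffix A's loop appends
def J : List String → String
  | [] => ""
  | [y] => ", and " ++ y
  | y :: z :: zs => ", " ++ y ++ J (z :: zs)

theorem pyGetD_nat (xs : List Int) (k : Nat) (h : k < xs.length) :
    PySem.List.pyGetD xs (k : Int) 0 = xs[k] := by
  simp [PySem.List.pyGetD_natCast, List.getD_eq_getElem?_getD, h]

theorem loopA (g : Int → String) (xs : List Int) :
    ∀ (d k : Nat) (s : String), k + d = xs.length →
    (PySem.List.pyRange (k : Int) (xs.length : Int) 1).foldl
      (fun returnStr num =>
        if num = (xs.length : Int) - 1 then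
          returnStr ++ ", and " ++ g (PySem.List.pyGetD xs num 0)
        else
          returnStr ++ ", " ++ g (PySem.List.pyGetD xs num 0)) s
    = tailJoin ((xs.drop k).map g) s := by
  intro d
  induction d with
  | zero =>
      intro k s hk
      rw [PySem.List.pyRange_one_eq_nil (by omega : (xs.length : Int) ≤ (k : Int))]
      rw [List.drop_of_length_le (by omega)]
      rfl
  | succ d ih =>
      intro k s hk
      have hklt : k < xs.length := by omega
      rw [PySem.List.pyRange_one_cons (by exact_mod_cast hklt)]
      rw [List.foldl_cons]
      rw [List.drop_eq_getElem_cons hklt]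
      by_cases hlast : (k : Int) = (xs.length : Int) - 1
      · have hd0 : d = 0 := by omega
        subst hd0
        rw [if_pos hlast]
        rw [PySem.List.pyRange_one_eq_nil (by omega : (xs.length : Int) ≤ (k : Int) + 1)]
        rw [List.drop_of_length_le (by omega : xs.length ≤ k + 1)]
        simp [tailJoin, pyGetD_nat xs k hklt]
      · rw [if_neg hlast]
        have hcast : ((k : Int) + 1) = (((k + 1 : Nat) : Int)) := by push_cast; ring
        rw [hcast, ih (k + 1) _ (by omega)]
        have hne : (xs.drop (k + 1)).map g ≠ [] := by
          simp [List.drop_eq_nil_iff]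
          omega
        obtain ⟨z, zs, hz⟩ := List.exists_cons_of_ne_nil hne
        rw [List.map_cons, hz]
        rw [pyGetD_nat xs k hklt]
        rfl

theorem tailJoin_J : ∀ (t : List String), t ≠ [] → ∀ s, tailJoin t s = s ++ J t := by
  intro t
  induction t with
  | nil => intro h; exact absurd rfl h
  | cons y ys ih =>
      intro _ s
      cases ys with
      | nil =>
          show s ++ ", and " ++ y = s ++ (", and " ++ y)
          apply String.toList_injective; simp
      | cons z zs =>
          show tailJoin (z :: zs) (s ++ ", " ++ y) = s ++ (", " ++ y ++ J (z :: zs))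
          rw [ih (by simp) (s ++ ", " ++ y)]
          apply String.toList_injective; simp

-- B's recursion with the flag off produces exactly A's loop suffix
theorem tailB_J (identities : List (Int × String)) :
    ∀ (t : List Int) (x : Int),
      tailB identities (x :: t) false
        = pyLookup identities x ++ J (t.map (pyLookup identities)) := by
  intro t
  induction t with
  | nil =>
      intro x
      show pyLookup identities x = pyLookup identities x ++ ""
      apply String.toList_injective; simp
  | cons y ys ih =>
      intro x
      cases ys with
      | nil =>
          show pyLookup identities x ++ ", and " ++ pyLookup identities y
              = pyLookup identities x ++ (", and " ++ pyLookup identities y)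
          apply String.toList_injective; simp
      | cons z zs =>
          show pyLookup identities x ++ ", " ++ tailB identities (y :: z :: zs) false
              = pyLookup identities x
                ++ (", " ++ pyLookup identities y ++ J ((z :: zs).map (pyLookup identities)))
          rw [ih y]
          apply String.toList_injective; simp

-- ===== VERDICT (by name: the statement is the Claim_ definition above) =====
theorem assistString_spec : Claim_equal_assistString := by
  intro assistList identities _ _
  unfold Spec_assistString
  match assistList with
  | [] => rfl
  | [a] =>
      simp [assistString, assistString_alt, tailB, PySem.List.pyGetD_zero_cons]
  | [a, b] =>
      have h1 : PySem.List.pyGetD [a, b] 1 0 = b := pyGetD_nat [a, b] 1 (by simp)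
      simp only [assistString, assistString_alt, List.length_cons, List.length_nil]
      rw [h1]
      simp only [PySem.List.pyGetD_zero_cons]
      norm_num [tailB]
      rw [if_neg (by simp : ¬([a, b] : List Int) = [])]
      apply String.toList_injective; simp
  | a :: b :: c :: rest =>
      have hA := loopA (pyLookup identities) (a :: b :: c :: rest) (rest.length + 2) 1
        (" with " ++ pyLookup identities (PySem.List.pyGetD (a :: b :: c :: rest) 0 0))
        (by simp only [List.length_cons]; omega)
      rw [show ((1 : Nat) : Int) = (1 : Int) from by norm_num] at hA
      rw [show List.drop 1 (a :: b :: c :: rest) = b :: c :: rest from rfl] at hA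
      simp only [assistString]
      rw [if_neg (by simp : ¬(a :: b :: c :: rest).length = 0),
          if_neg (by simp only [List.length_cons]; omega : ¬(a :: b :: c :: rest).length = 1),
          if_neg (by simp only [List.length_cons]; omega : ¬(a :: b :: c :: rest).length = 2)]
      rw [hA, tailJoin_J _ (by simp), PySem.List.pyGetD_zero_cons]
      -- B side
      simp only [assistString_alt]
      rw [if_neg (by simp : ¬(a :: b :: c :: rest) = [])]
      have hflag : ((a :: b :: c :: rest).length == 2) = false := by
        rw [beq_eq_false_iff_ne]; simp only [List.length_cons]; omega
      rw [hflag, tailB_J identities (b :: c :: rest) a]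
      apply String.toList_injective; simp
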